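-- pv_equiv track=rewrite | github.com/sqoojack/Master-Thesis-CodeGuard | main_code/attack/Adversarial_attack/INSEC/insec/AdversarialTokens.py | first_line_indent
-- ===== SOURCE A (Python) =====
-- def first_line_indent(s):
--     count = 0
--     for char in s:
--         if char in (" ", "\t"):
--             count += 1
--         else:
--             break
--     return s[0:count]
-- ===== SOURCE B (Python) =====
-- def first_line_indent(s):
--     # Divide and conquer: the indent of s is the indent of the left half,
--     # extended by the indent of the right half only when the whole left
--     # half is indentation.
--     if len(s) <= 1:
--         return s if s in (" ", "\t") else ""
--     mid = len(s) // 2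
--     left = first_line_indent(s[:mid])
--     if len(left) == mid:
--         return left + first_line_indent(s[mid:])
--     return left
-- ===== Notes on version B (the rewrite author's own statement) =====
-- stated objective: alternative
-- what changed: Replaces the left-to-right counting loop with a divide-and-conquer recursion: split the string at the midpoint, compute the indent of the left half, and append the right half's indent only when the entire left half is indentation; no counter, no slicing by a scanned index.
import Mathlib
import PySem

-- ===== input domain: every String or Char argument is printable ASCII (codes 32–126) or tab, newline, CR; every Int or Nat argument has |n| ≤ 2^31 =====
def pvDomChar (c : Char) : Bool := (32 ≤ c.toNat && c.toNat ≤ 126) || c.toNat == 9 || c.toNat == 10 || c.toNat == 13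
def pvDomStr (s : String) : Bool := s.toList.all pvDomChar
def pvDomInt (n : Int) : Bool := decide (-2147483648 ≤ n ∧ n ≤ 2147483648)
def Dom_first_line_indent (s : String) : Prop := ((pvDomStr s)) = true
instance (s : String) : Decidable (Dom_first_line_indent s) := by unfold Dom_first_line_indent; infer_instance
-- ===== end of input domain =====

-- B replaces A's left-to-right counting loop with a divide-and-conquer recursion on string halves; same return value (objective: alternative decomposition).


-- ===== PORT A =====
-- the for-loop with break: count leading chars in {' ', '\t'}, stopping at the first other char
def pvCountLoop (l : List Char) (count : Nat) : Nat :=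
  match l with
  | [] => count
  | ch :: rest => if ch == ' ' || ch == '\t' then pvCountLoop rest (count + 1) else count

def first_line_indent (s : String) : String :=
  String.ofList (PySem.List.slice s.toList (some 0) (some ((pvCountLoop s.toList 0 : Nat) : Int)))   -- s[0:count]

-- ===== PORT B =====
-- divide and conquer over the char list, following Source B: base case len ≤ 1, split at len/2 (s[:mid] / s[mid:] = take/drop).
-- fuel (initially the length) only makes the halving recursion structural; it never alters the computation.
def pvIndentDCF (fuel : Nat) (l : List Char) : List Char :=
  match fuel with
  | 0 => []
  | fuel + 1 =>
    if l.length ≤ 1 then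
      (if l == [' '] || l == ['\t'] then l else [])      -- s in (" ", "\t")
    else
      let mid := l.length / 2
      let left := pvIndentDCF fuel (l.take mid)
      if left.length = mid then left ++ pvIndentDCF fuel (l.drop mid) else left

def first_line_indent_alt (s : String) : String := String.ofList (pvIndentDCF s.toList.length s.toList)

-- ===== PRECONDITION & SPEC =====
def Spec_first_line_indent (s : String) (out : String) : Prop := out = first_line_indent_alt s
instance (s : String) (out : String) : Decidable (Spec_first_line_indent s out) := by unfold Spec_first_line_indent; infer_instance

-- ===== CLAIM (what is proved, stated in full; the proofs are below) =====
def Claim_equal_first_line_indent : Prop := ∀ (s : String), Dom_first_line_indent s → Spec_first_line_indent s (first_line_indent s)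

-- ===== LEMMAS AND PROOFS =====
theorem pvCountLoop_eq_takeWhile (l : List Char) (c : Nat) :
    pvCountLoop l c = c + (l.takeWhile (fun ch => ch == ' ' || ch == '\t')).length := by
  induction l generalizing c with
  | nil => simp [pvCountLoop]
  | cons ch rest ih =>
    by_cases h : (ch == ' ' || ch == '\t') = true
    · simp [pvCountLoop, h, ih]; omega
    · simp [pvCountLoop, h]

theorem pvIndentDCF_eq_takeWhile (n : Nat) : ∀ (l : List Char), l.length ≤ n →
    pvIndentDCF n l = l.takeWhile (fun ch => ch == ' ' || ch == '\t') := by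
  induction n with
  | zero =>
    intro l hl
    have : l = [] := List.eq_nil_of_length_eq_zero (Nat.le_zero.mp hl)
    subst this; simp [pvIndentDCF]
  | succ n ih =>
    intro l hl
    by_cases h : l.length ≤ 1
    · rw [pvIndentDCF]; simp only [h, if_true]
      match l, h with
      | [], _ => simp
      | [ch], _ =>
        by_cases hs : ch = ' '
        · simp [hs]
        · by_cases ht : ch = '\t' <;> simp [hs, ht]
    · rw [pvIndentDCF]; simp only [h, if_false]
      have h2 : 2 ≤ l.length := by omega
      have htk : (l.take (l.length / 2)).length ≤ n := by
        simp only [List.length_take]; omega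
      have hdr : (l.drop (l.length / 2)).length ≤ n := by
        simp only [List.length_drop]; omega
      rw [ih _ htk, ih _ hdr]
      have hsplit := List.takeWhile_append (xs := l.take (l.length / 2))
        (ys := l.drop (l.length / 2)) (p := fun ch => ch == ' ' || ch == '\t')
      rw [List.take_append_drop] at hsplit
      rw [hsplit]
      simp only [List.length_take]
      have hmin : min (l.length / 2) l.length = l.length / 2 := by omega
      rw [hmin]
      split_ifs with hc
      · congr 1
        exact List.IsPrefix.eq_of_length (List.takeWhile_prefix _)
          (by simp only [List.length_take]; omega)
      · rfl

theorem pvTakeWhile_take (l : List Char) :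
    l.take (l.takeWhile (fun ch => ch == ' ' || ch == '\t')).length
      = l.takeWhile (fun ch => ch == ' ' || ch == '\t') := by
  obtain ⟨t, ht⟩ := List.takeWhile_prefix (l := l) (p := fun ch => ch == ' ' || ch == '\t')
  have h := List.take_left (l₁ := l.takeWhile (fun ch => ch == ' ' || ch == '\t')) (l₂ := t)
  rw [ht] at h
  exact h

-- ===== VERDICT (by name: the statement is the Claim_ definition above) =====
theorem first_line_indent_spec : Claim_equal_first_line_indent := by
  intro s _
  unfold Spec_first_line_indent first_line_indent first_line_indent_alt
  rw [pvCountLoop_eq_takeWhile, pvIndentDCF_eq_takeWhile _ _ le_rfl, PySem.List.slice_zero_start,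
    PySem.List.slice_to_natCast]
  simp [pvTakeWhile_take]
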